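-- pv_equiv track=rewrite | github.com/WPoelman/ud-boxer | synse/graph_resolver.py | parse_edge_name
-- ===== SOURCE A (Python) =====
-- from typing import Any, Dict, List, Tuple
--
-- def parse_edge_name(edge_name) -> Dict[str, str]:
--     # Grew encodes edge data in a similar way Feats are encoded in UD Conll
--     # parses, so a single string that has to be split up into components.
--     edge_data = {
--         key: value
--         for key, value in [
--             item.split("=") for item in edge_name.split(",")
--         ]
--     }
--     # Grew encodes deprels in a peculiar way, reconstruct it here.
--     deprel_comp = [
--         edge_data[deprel_component]
--         for deprel_component in ["1", "2"]
--         if deprel_component in edge_data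
--     ]
--     edge_data.pop("1", None)
--     edge_data.pop("2", None)
--     deprel = ":".join(deprel_comp) if deprel_comp else None
--     edge_data["deprel"] = deprel
--
--     return edge_data
-- ===== SOURCE B (Python) =====
-- def parse_edge_name(edge_name):
--     # Character-level finite-state scanner: no split() calls at all.  One walk
--     # over the characters with key/value buffers; a comma commits the pair,
--     # the first '=' of an item switches from key-mode to value-mode.
--     result = {}
--     c1 = c2 = None
--     key = ""
--     val = ""
--     in_val = False
--     for ch in edge_name + ",":
--         if ch == ",":
--             if not in_val:
--                 raise ValueError(f"malformed item (no '='): {key!r}")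
--             if key == "1":
--                 c1 = val
--             elif key == "2":
--                 c2 = val
--             else:
--                 result[key] = val
--             key, val, in_val = "", "", False
--         elif ch == "=" and not in_val:
--             in_val = True
--         elif in_val:
--             val += ch
--         else:
--             key += ch
--     parts = [x for x in (c1, c2) if x is not None]
--     result["deprel"] = ":".join(parts) if parts else None
--     return result
-- ===== Notes on version B (the rewrite author's own statement) =====
-- stated objective: alternative
-- what changed: A splits on ',' and '=' into pairs, builds a dict, then extracts and pops keys '1'/'2' to rebuild deprel; B uses no splitting at all: a character-level finite-state scanner walks the string once with key/value buffers and an in-value flag, committing each pair at a comma and routing '1'/'2' to deprel components.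
import Mathlib
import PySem

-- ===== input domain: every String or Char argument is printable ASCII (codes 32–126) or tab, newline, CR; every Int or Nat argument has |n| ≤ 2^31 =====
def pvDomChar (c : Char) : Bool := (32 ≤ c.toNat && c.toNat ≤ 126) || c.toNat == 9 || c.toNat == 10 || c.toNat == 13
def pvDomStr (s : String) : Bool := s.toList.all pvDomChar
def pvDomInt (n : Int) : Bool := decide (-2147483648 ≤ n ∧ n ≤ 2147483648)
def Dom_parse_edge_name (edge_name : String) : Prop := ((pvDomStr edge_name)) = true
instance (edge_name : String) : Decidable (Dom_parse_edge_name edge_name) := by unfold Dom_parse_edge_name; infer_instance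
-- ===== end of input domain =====

-- B replaces A's split-based passes (split on ',' and '=', build a dict, extract and pop
-- "1"/"2") by a character-level finite-state scanner with no splitting at all (objective:
-- alternative, same asymptotic cost).

-- ===== PORT A =====
-- s.split(sep) for a nonempty literal sep (PySem.Chars.splitOn lifted to String)
def pvSplitA (s sep : String) : List String :=
  (PySem.Chars.splitOn s.toList sep.toList).map String.ofList

-- A: dict comprehension over the split pairs, then extract/pop "1","2", then add "deprel".
def parse_edge_name (edge_name : String) : List (String × Option String) :=
  let edge_data : PySem.Dict String String :=
    ((pvSplitA edge_name ",").map (fun item => pvSplitA item "=")).foldl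
      (fun d parts =>
        match parts with
        | [k, v] => d.insert k v
        | _ => d)      -- not [k, v]: Python raises ValueError here; excluded by Pre_
      PySem.Dict.empty
  let deprel_comp : List String :=
    (["1", "2"]).foldl
      (fun acc c => if edge_data.contains c then acc ++ [edge_data.getD c ""] else acc) []
  let edge_data := (edge_data.erase "1").erase "2"   -- pop("1", None); pop("2", None)
  let deprel : Option String :=
    if deprel_comp ≠ [] then some (PySem.Str.join ":" deprel_comp) else none
  ((PySem.Dict.mk (edge_data.items.map (fun p => (p.1, some p.2)))).insert "deprel" deprel).items

-- ===== PORT B =====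
-- B's scanner state: result dict, the two deprel components, key/value buffers, mode flag
structure PvScan where
  r : PySem.Dict String String
  c1 : Option String
  c2 : Option String
  key : List Char      -- Python accumulates `key += ch`; List Char is the faithful form
  val : List Char
  inv : Bool           -- in_val
  deriving Repr

-- commit of one item at a comma: route the pair to c1 / c2 / result, reset the buffers.
-- When st.inv = false (no '=' in the item) Python B raises ValueError; those inputs are
-- excluded by Pre_, so the port just commits the buffers.
def pvCommit (st : PvScan) : PvScan :=
  let k := String.ofList st.key
  let v := String.ofList st.val
  if k = "1" then { st with c1 := some v, key := [], val := [], inv := false }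
  else if k = "2" then { st with c2 := some v, key := [], val := [], inv := false }
  else { st with r := st.r.insert k v, key := [], val := [], inv := false }

-- one character of the scanner (the body of B's `for ch in edge_name + ","`)
def pvStep (st : PvScan) (ch : Char) : PvScan :=
  if ch = ',' then pvCommit st
  else if ch = '=' ∧ st.inv = false then { st with inv := true }
  else if st.inv then { st with val := st.val ++ [ch] }
  else { st with key := st.key ++ [ch] }

def parse_edge_name_alt (edge_name : String) : List (String × Option String) :=
  let st := (edge_name.toList ++ [',']).foldl pvStep ⟨PySem.Dict.empty, none, none, [], [], false⟩
  let parts : List String := ([st.c1, st.c2]).filterMap id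
  let deprel : Option String :=
    if parts ≠ [] then some (PySem.Str.join ":" parts) else none
  ((PySem.Dict.mk (st.r.items.map (fun p => (p.1, some p.2)))).insert "deprel" deprel).items

-- ===== PRECONDITION & SPEC =====
-- Pre_ excludes exactly the inputs where Python A raises ValueError: some comma-separated
-- item does not split into exactly two pieces (zero or several equals-sign separators).
def Pre_parse_edge_name (edge_name : String) : Prop :=
  ∀ item ∈ (PySem.Chars.splitOn edge_name.toList ",".toList).map String.ofList,
    (PySem.Chars.splitOn item.toList "=".toList).length = 2
instance (edge_name : String) : Decidable (Pre_parse_edge_name edge_name) := by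
  unfold Pre_parse_edge_name; infer_instance
def pvWitness_parse_edge_name : String := "1=nsubj,2=pass,feat=x"
def Spec_parse_edge_name (edge_name : String) (out : List (String × Option String)) : Prop := out = parse_edge_name_alt edge_name
instance (edge_name : String) (out : List (String × Option String)) : Decidable (Spec_parse_edge_name edge_name out) := by unfold Spec_parse_edge_name; infer_instance

-- ===== CLAIM (what is proved, stated in full; the proofs are below) =====
def Claim_equal_parse_edge_name : Prop := ∀ (edge_name : String), Dom_parse_edge_name edge_name → Pre_parse_edge_name edge_name → Spec_parse_edge_name edge_name (parse_edge_name edge_name)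

-- ===== LEMMAS AND PROOFS =====

-- -------- 1. a structural characterisation of PySem.Chars.splitOn for a one-char separator
def pvSplit1 (c : Char) : List Char → List (List Char)
  | [] => [[]]
  | x :: xs => if x = c then [] :: pvSplit1 c xs
               else match pvSplit1 c xs with
                    | [] => [[x]]          -- unreachable: pvSplit1 never returns []
                    | h :: t => (x :: h) :: t

theorem pvSplit1_ne_nil (c : Char) (s : List Char) : pvSplit1 c s ≠ [] := by
  induction s with
  | nil => simp [pvSplit1]
  | cons x xs ih =>
      simp only [pvSplit1]
      split_ifs
      · simp
      · rcases h : pvSplit1 c xs with _ | ⟨h', t⟩ <;> simp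

theorem pv_go_spec (c : Char) :
    ∀ fuel (s cur : List Char) acc, s.length < fuel →
      PySem.Chars.splitOn.go [c] fuel s cur acc =
        acc.reverse ++
          (match pvSplit1 c s with
           | [] => [cur.reverse]
           | h :: t => (cur.reverse ++ h) :: t) := by
  intro fuel
  induction fuel with
  | zero => intro s cur acc h; omega
  | succ n ih =>
      intro s cur acc h
      match s with
      | [] => simp [PySem.Chars.splitOn.go, pvSplit1]
      | x :: rest =>
          by_cases hx : x = c
          · subst hx
            have : PySem.Chars.splitOn.go [x] (n+1) (x::rest) cur acc =
                PySem.Chars.splitOn.go [x] n rest [] (cur.reverse :: acc) := by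
              simp [PySem.Chars.splitOn.go, List.isPrefixOf]
            rw [this, ih rest [] (cur.reverse :: acc) (by simp at h; omega)]
            rcases hs : pvSplit1 x rest with _ | ⟨h', t⟩
            · exact absurd hs (pvSplit1_ne_nil x rest)
            · simp [pvSplit1, hs]
          · have : PySem.Chars.splitOn.go [c] (n+1) (x::rest) cur acc =
                PySem.Chars.splitOn.go [c] n rest (x :: cur) acc := by
              simp [PySem.Chars.splitOn.go, List.isPrefixOf, Ne.symm hx]
            rw [this, ih rest (x :: cur) acc (by simp at h; omega)]
            rcases hs : pvSplit1 c rest with _ | ⟨h', t⟩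
            · exact absurd hs (pvSplit1_ne_nil c rest)
            · simp [pvSplit1, hx, hs]

theorem pv_splitOn_eq (c : Char) (s : List Char) :
    PySem.Chars.splitOn s [c] = pvSplit1 c s := by
  rw [show PySem.Chars.splitOn s [c] = PySem.Chars.splitOn.go [c] (s.length + 1) s [] [] from rfl,
    pv_go_spec c (s.length+1) s [] [] (by omega)]
  rcases hs : pvSplit1 c s with _ | ⟨h', t⟩
  · exact absurd hs (pvSplit1_ne_nil c s)
  · simp

theorem pv_not_mem_pvSplit1 (c : Char) (s : List Char) :
    ∀ chunk ∈ pvSplit1 c s, c ∉ chunk := by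
  induction s with
  | nil => simp [pvSplit1]
  | cons x xs ih =>
      by_cases hx : x = c
      · subst hx; simpa [pvSplit1] using ih
      · rcases hs : pvSplit1 c xs with _ | ⟨h', t⟩
        · exact absurd hs (pvSplit1_ne_nil c xs)
        · intro chunk hc
          simp [pvSplit1, hx, hs] at hc
          rcases hc with hc | hc
          · subst hc
            intro hmem
            rcases List.mem_cons.mp hmem with h1 | h1
            · exact hx h1.symm
            · exact ih h' (by simp [hs]) h1
          · exact ih chunk (by simp [hs, hc])

theorem pv_split1_single (c : Char) (s : List Char) :
    ∀ v, pvSplit1 c s = [v] → s = v := by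
  induction s with
  | nil => intro v hv; simp [pvSplit1] at hv; simp [hv]
  | cons y ys ih =>
      intro v hv
      by_cases hy : y = c
      · simp [pvSplit1, hy] at hv
        exact absurd hv.2 (pvSplit1_ne_nil c ys)
      · rcases hs : pvSplit1 c ys with _ | ⟨h', t⟩
        · exact absurd hs (pvSplit1_ne_nil c ys)
        · simp [pvSplit1, hy, hs] at hv
          rcases hv with ⟨hv1, hv2⟩
          subst hv2
          have := ih h' (by simp [hs])
          simp [← hv1, this]

theorem pv_split1_pair (c : Char) (chunk : List Char) :
    ∀ k v, pvSplit1 c chunk = [k, v] → chunk = k ++ c :: v ∧ c ∉ k := by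
  induction chunk with
  | nil => intro k v h; simp [pvSplit1] at h
  | cons x xs ih =>
      intro k v h
      by_cases hx : x = c
      · subst hx
        simp [pvSplit1] at h
        obtain ⟨hk, hv⟩ := h
        subst hk
        simp [pv_split1_single _ _ _ hv]
      · rcases hs : pvSplit1 c xs with _ | ⟨h', t⟩
        · exact absurd hs (pvSplit1_ne_nil c xs)
        · simp [pvSplit1, hx, hs] at h
          obtain ⟨hk, ht⟩ := h
          have := ih h' v (by simp [hs, ht])
          constructor
          · rw [← hk]; simp [this.1]
          · rw [← hk]; intro hm
            rcases List.mem_cons.mp hm with h1 | h1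
            · exact hx h1.symm
            · exact this.2 h1

-- -------- 2. the char-level fold factors through the chunks
def pvCommitScan (st : PvScan) (chunk : List Char) : PvScan :=
  pvCommit (chunk.foldl pvStep st)

theorem pv_fold_chunks (s : List Char) : ∀ (st : PvScan),
    (s ++ [',']).foldl pvStep st = (pvSplit1 ',' s).foldl pvCommitScan st := by
  induction s with
  | nil =>
      intro st
      simp [pvSplit1, pvCommitScan, pvStep, List.foldl]
  | cons x xs ih =>
      intro st
      by_cases hx : x = ','
      · subst hx
        have h1 : pvStep st ',' = pvCommit st := by simp [pvStep]
        simp only [List.cons_append, List.foldl_cons, h1, ih, pvSplit1]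
        simp [pvCommitScan, List.foldl]
      · rcases hs : pvSplit1 ',' xs with _ | ⟨h', t⟩
        · exact absurd hs (pvSplit1_ne_nil ',' xs)
        · simp only [List.cons_append, List.foldl_cons, ih, hs, pvSplit1, if_neg hx,
            List.foldl_cons]
          simp [pvCommitScan]

-- scanning the key part (no ',' and no '=') only grows the key buffer
theorem pv_scan_key (ks : List Char) (hks : ',' ∉ ks ∧ '=' ∉ ks) :
    ∀ (r : PySem.Dict String String) (c1 c2 : Option String) (kb : List Char),
      ks.foldl pvStep ⟨r, c1, c2, kb, [], false⟩ = ⟨r, c1, c2, kb ++ ks, [], false⟩ := by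
  induction ks with
  | nil => intro r c1 c2 kb; simp
  | cons k0 ks' ih =>
      intro r c1 c2 kb
      have h0 : pvStep ⟨r, c1, c2, kb, [], false⟩ k0 = ⟨r, c1, c2, kb ++ [k0], [], false⟩ := by
        have hk0 : k0 ≠ ',' := fun h => hks.1 (by simp [h])
        have hk0' : k0 ≠ '=' := fun h => hks.2 (by simp [h])
        simp [pvStep, hk0, hk0']
      rw [List.foldl_cons, h0,
        ih ⟨fun h => hks.1 (by simp [h]), fun h => hks.2 (by simp [h])⟩]
      simp

-- scanning the value part (no ',') in value mode only grows the value buffer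
theorem pv_scan_val (vs : List Char) (hvs : ',' ∉ vs) :
    ∀ (r : PySem.Dict String String) (c1 c2 : Option String) (k vb : List Char),
      vs.foldl pvStep ⟨r, c1, c2, k, vb, true⟩ = ⟨r, c1, c2, k, vb ++ vs, true⟩ := by
  induction vs with
  | nil => intro r c1 c2 k vb; simp
  | cons v0 vs' ih =>
      intro r c1 c2 k vb
      have h0 : pvStep ⟨r, c1, c2, k, vb, true⟩ v0 = ⟨r, c1, c2, k, vb ++ [v0], true⟩ := by
        have hv0 : v0 ≠ ',' := fun h => hvs (by simp [h])
        simp [pvStep, hv0]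
      rw [List.foldl_cons, h0, ih (fun h => hvs (by simp [h]))]
      simp

-- -------- 3. list-level facts about insert's overwrite map and erase's filter (A-side dict)
theorem pv_filter_map_overwrite {ν : Type} (k : String) (v : ν) (l : List (String × ν)) :
    (l.map (fun p => if p.1 == k then (k, v) else p)).filter (fun p => !(p.1 == k)) =
      l.filter (fun p => !(p.1 == k)) := by
  induction l with
  | nil => rfl
  | cons p t ih => by_cases h : p.1 = k <;> simp [h] <;> simpa using ih

theorem pv_any_filter_ne {ν : Type} (k k' : String) (h : k' ≠ k) (l : List (String × ν)) :
    ((l.filter (fun p => !(p.1 == k))).any (fun p => p.1 == k')) =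
      l.any (fun p => p.1 == k') := by
  induction l with
  | nil => rfl
  | cons p t ih =>
      by_cases hp : p.1 = k
      · simp only [List.filter_cons]
        have hb : (!(p.1 == k)) = false := by simp [hp]
        rw [hb]; simp only [if_neg (by simp : ¬(false = true))]
        rw [ih, List.any_cons]
        have hb' : (p.1 == k') = false := by simp [hp, Ne.symm h]
        simp [hb']
      · simp only [List.filter_cons]
        have hb : (!(p.1 == k)) = true := by simp [hp]
        rw [hb]; simp [List.any_cons, ih]

theorem pv_filter_map_comm {ν : Type} (k k' : String) (v : ν) (h : k' ≠ k)
    (l : List (String × ν)) :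
    (l.map (fun p => if p.1 == k' then (k', v) else p)).filter (fun p => !(p.1 == k)) =
      (l.filter (fun p => !(p.1 == k))).map (fun p => if p.1 == k' then (k', v) else p) := by
  have h' : ¬ k = k' := fun hh => h hh.symm
  induction l with
  | nil => rfl
  | cons p t ih =>
      by_cases hp' : p.1 = k'
      · have hpk : ¬ p.1 = k := by rw [hp']; exact h
        simp [hp', h]
        simpa using ih
      · by_cases hp : p.1 = k
        · simp [hp, h']
          simpa using ih
        · simp [hp, hp']
          simpa using ih

theorem pv_erase_insert_self {ν : Type} (d : PySem.Dict String ν) (k : String) (v : ν) :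
    (d.insert k v).erase k = d.erase k := by
  simp only [PySem.Dict.insert, PySem.Dict.erase]
  split
  · exact congrArg PySem.Dict.mk (pv_filter_map_overwrite k v d.items)
  · simp [List.filter_append]

theorem pv_erase_insert_of_ne {ν : Type} (d : PySem.Dict String ν) (k k' : String) (v : ν)
    (h : k' ≠ k) : (d.insert k' v).erase k = (d.erase k).insert k' v := by
  have hc : (d.erase k).contains k' = d.contains k' := by
    simpa [PySem.Dict.erase, PySem.Dict.contains, PySem.Dict.keys, List.any_map,
      Function.comp] using pv_any_filter_ne k k' h d.items
  by_cases hck : d.contains k' = true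
  · rw [show d.insert k' v =
        PySem.Dict.mk (d.items.map (fun p => if p.1 == k' then (k', v) else p)) from by
      simp [PySem.Dict.insert, hck]]
    rw [show (d.erase k).insert k' v =
        PySem.Dict.mk ((d.erase k).items.map (fun p => if p.1 == k' then (k', v) else p)) from by
      simp [PySem.Dict.insert, hc, hck]]
    simp only [PySem.Dict.erase]
    exact congrArg PySem.Dict.mk (pv_filter_map_comm k k' v h d.items)
  · have hck2 : ¬ (d.erase k).contains k' = true := by rw [hc]; exact hck
    rw [show d.insert k' v = PySem.Dict.mk (d.items ++ [(k', v)]) from by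
      simp only [PySem.Dict.insert, if_neg hck]]
    rw [show (d.erase k).insert k' v = PySem.Dict.mk ((d.erase k).items ++ [(k', v)]) from by
      simp only [PySem.Dict.insert, if_neg hck2]]
    simp only [PySem.Dict.erase]
    exact congrArg PySem.Dict.mk (by simp [List.filter_append, h])

-- A's fold step over one item (the dict comprehension's body, after List.foldl_map)
def pvAStep (d : PySem.Dict String String) (item : String) : PySem.Dict String String :=
  match pvSplitA item "=" with
  | [k, v] => d.insert k v
  | _ => d

-- commit of a well-formed chunk = routing step on the parsed key/value strings
theorem pv_commitScan_eq (chunk k v : List Char) (hc : ',' ∉ chunk)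
    (h : pvSplit1 '=' chunk = [k, v])
    (r : PySem.Dict String String) (c1 c2 : Option String) :
    pvCommitScan ⟨r, c1, c2, [], [], false⟩ chunk =
      (if String.ofList k = "1" then (⟨r, some (String.ofList v), c2, [], [], false⟩ : PvScan)
       else if String.ofList k = "2" then ⟨r, c1, some (String.ofList v), [], [], false⟩
       else ⟨r.insert (String.ofList k) (String.ofList v), c1, c2, [], [], false⟩) := by
  obtain ⟨hdec, hkeq⟩ := pv_split1_pair '=' chunk k v h
  subst hdec
  have hck : ',' ∉ k := fun hm => hc (by simp [hm])
  have hcv : ',' ∉ v := fun hm => hc (by simp [hm])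
  unfold pvCommitScan
  rw [List.foldl_append, pv_scan_key k ⟨hck, hkeq⟩, List.nil_append, List.foldl_cons]
  have hstep : pvStep ⟨r, c1, c2, k, [], false⟩ '=' = ⟨r, c1, c2, k, [], true⟩ := by
    simp [pvStep]
  rw [hstep, pv_scan_val v hcv, List.nil_append]
  simp only [pvCommit]

-- -------- 4. loop invariant: B's chunk fold tracks A's dict through get? "1"/"2" and the erases
theorem pv_loop_inv (chunks : List (List Char))
    (hpre : ∀ chunk ∈ chunks, ',' ∉ chunk ∧ ∃ k v, pvSplit1 '=' chunk = [k, v]) :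
    ∀ (d : PySem.Dict String String) (c1 c2 : Option String) (r : PySem.Dict String String),
    d.get? "1" = c1 → d.get? "2" = c2 → (d.erase "1").erase "2" = r →
    chunks.foldl pvCommitScan ⟨r, c1, c2, [], [], false⟩ =
      ⟨(((chunks.map String.ofList).foldl pvAStep d).erase "1").erase "2",
        ((chunks.map String.ofList).foldl pvAStep d).get? "1",
        ((chunks.map String.ofList).foldl pvAStep d).get? "2", [], [], false⟩ := by
  revert hpre
  induction chunks with
  | nil => intro _ d c1 c2 r d1 d2 dr; simp [List.foldl, d1, d2, dr]
  | cons chunk rest ih =>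
      intro hpre d c1 c2 r d1 d2 dr
      obtain ⟨hcc, k, v, hkv⟩ := hpre chunk (by simp)
      have hA : pvAStep d (String.ofList chunk) =
          d.insert (String.ofList k) (String.ofList v) := by
        simp [pvAStep, pvSplitA, pv_splitOn_eq, hkv]
      have hrest : ∀ c ∈ rest, ',' ∉ c ∧ ∃ k v, pvSplit1 '=' c = [k, v] :=
        fun c hcm => hpre c (by simp [hcm])
      have ih := ih hrest
      rw [List.map_cons, List.foldl_cons, List.foldl_cons, hA,
        pv_commitScan_eq chunk k v hcc hkv r c1 c2]
      by_cases hk1 : String.ofList k = "1"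
      · rw [if_pos hk1, hk1]
        exact ih _ _ _ _ (PySem.Dict.get?_insert_self d "1" (String.ofList v))
          (by rw [PySem.Dict.get?_insert_of_ne d (String.ofList v)
                (by decide : ("2":String) ≠ "1"), d2])
          (by rw [pv_erase_insert_self, dr])
      · by_cases hk2 : String.ofList k = "2"
        · rw [if_neg hk1, if_pos hk2, hk2]
          exact ih _ _ _ _
            (by rw [PySem.Dict.get?_insert_of_ne d (String.ofList v)
                  (by decide : ("1":String) ≠ "2"), d1])
            (PySem.Dict.get?_insert_self d "2" (String.ofList v))
            (by rw [pv_erase_insert_of_ne d "1" "2" (String.ofList v) (by decide),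
                    pv_erase_insert_self, dr])
        · rw [if_neg hk1, if_neg hk2]
          exact ih _ _ _ _
            (by rw [PySem.Dict.get?_insert_of_ne d (String.ofList v)
                  (fun h => hk1 h.symm), d1])
            (by rw [PySem.Dict.get?_insert_of_ne d (String.ofList v)
                  (fun h => hk2 h.symm), d2])
            (by rw [pv_erase_insert_of_ne d "1" (String.ofList k) (String.ofList v) hk1,
                    pv_erase_insert_of_ne _ "2" (String.ofList k) (String.ofList v) hk2, dr])

-- ===== VERDICT (by name: the statement is the Claim_ definition above) =====
theorem parse_edge_name_spec : Claim_equal_parse_edge_name := by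
  intro edge_name _ hpre
  unfold Spec_parse_edge_name parse_edge_name parse_edge_name_alt
  have hsplit : pvSplitA edge_name "," =
      (pvSplit1 ',' edge_name.toList).map String.ofList := by
    simp [pvSplitA, pv_splitOn_eq]
  have hchunks : ∀ chunk ∈ pvSplit1 ',' edge_name.toList,
      ',' ∉ chunk ∧ ∃ k v, pvSplit1 '=' chunk = [k, v] := by
    intro chunk hm
    refine ⟨pv_not_mem_pvSplit1 ',' edge_name.toList chunk hm, ?_⟩
    have h2 := hpre (String.ofList chunk)
      (by rw [show ",".toList = [','] from rfl, pv_splitOn_eq]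
          exact List.mem_map_of_mem hm)
    rw [show (String.ofList chunk).toList = chunk by simp,
      show "=".toList = ['='] from rfl, pv_splitOn_eq] at h2
    rcases hl : pvSplit1 '=' chunk with _ | ⟨k, _ | ⟨v, _ | _⟩⟩ <;>
      simp [hl] at h2 <;> exact ⟨k, v, rfl⟩
  rw [hsplit, List.foldl_map,
    show (fun (d : PySem.Dict String String) (item : String) =>
        match pvSplitA item "=" with | [k, v] => d.insert k v | _ => d) = pvAStep from rfl,
    pv_fold_chunks edge_name.toList,
    pv_loop_inv (pvSplit1 ',' edge_name.toList) hchunks PySem.Dict.empty none none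
      PySem.Dict.empty rfl rfl rfl]
  set D := ((pvSplit1 ',' edge_name.toList).map String.ofList).foldl pvAStep
    PySem.Dict.empty with hD
  have hcont1 : D.contains "1" = (D.get? "1").isSome := PySem.Dict.contains_eq_isSome_get? D "1"
  have hcont2 : D.contains "2" = (D.get? "2").isSome := PySem.Dict.contains_eq_isSome_get? D "2"
  rcases h1 : D.get? "1" with _ | v1 <;> rcases h2 : D.get? "2" with _ | v2 <;>
    simp [hcont1, hcont2, h1, h2, PySem.Dict.getD_eq_get?_getD]
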